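-- pv_equiv track=rewrite | github.com/pypi-data/pypi-mirror-107 | packages/rnxcovpy/rnxcovpy-0.1.2-py3-none-any.whl/rnxcovpy/element.py | obs211to30x_obs_typr_str
-- ===== SOURCE A (Python) =====
-- def obs211to30x_obs_type_num_str(lentmp):
--     if lentmp < 10:
--         return ' ' * 2 + str(lentmp)
--     elif 10 <= lentmp < 100:
--         return ' ' + str(lentmp)
--     else:
--         return str(lentmp)
--
-- def obs211to30x_obs_typr_str(list_obs_type302, sys_str):
--     lentmp = len(list_obs_type302)
--     type_obs_str = str()
--     for i in range(0, int((lentmp - 1) / 13)):  # 大于13个 循环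
--         type_obs_str = type_obs_str + ' '.join(
--             list_obs_type302[i * 13:(i + 1) * 13]) + "  SYS / # / OBS TYPES \n" + ' ' * 7
--     type_obs_str = sys_str + ' ' * 2 + obs211to30x_obs_type_num_str(lentmp) + ' ' + type_obs_str
--     if lentmp % 13 == 0 and lentmp > 0:
--         type_obs_str = type_obs_str + ' '.join(list_obs_type302[-13:]) + "  SYS / # / OBS TYPES \n"
--     else:
--         type_obs_str = type_obs_str + ' '.join(list_obs_type302[-(lentmp % 13):]) + ' ' * (
--                 (13 - lentmp % 13) * 4) + "  SYS / # / OBS TYPES \n"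
--     return type_obs_str
-- ===== SOURCE B (Python) =====
-- def _chunks13(lst):
--     if len(lst) <= 13:
--         return [lst]
--     return [lst[:13]] + _chunks13(lst[13:])
--
-- def _render(chunks):
--     head = chunks[0]
--     if len(chunks) == 1:
--         # last line: pad the missing observation-type columns (4 chars each)
--         return ' '.join(head) + ' ' * ((13 - len(head)) * 4) + "  SYS / # / OBS TYPES \n"
--     return ' '.join(head) + "  SYS / # / OBS TYPES \n" + ' ' * 7 + _render(chunks[1:])
--
-- def obs211to30x_obs_typr_str(list_obs_type302, sys_str):
--     n = len(list_obs_type302)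
--     num = str(n) if n >= 100 else (' ' + str(n) if n >= 10 else '  ' + str(n))
--     return sys_str + '  ' + num + ' ' + _render(_chunks13(list_obs_type302))
-- ===== Notes on version B (the rewrite author's own statement) =====
-- stated objective: simpler
-- what changed: Replaces A's index-arithmetic loop over range(int((len-1)/13)) plus negative-tail slices and a padded/unpadded final special case by a recursive split of the list into 13-element chunks and a recursive renderer that pads the last chunk uniformly.
import Mathlib
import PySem

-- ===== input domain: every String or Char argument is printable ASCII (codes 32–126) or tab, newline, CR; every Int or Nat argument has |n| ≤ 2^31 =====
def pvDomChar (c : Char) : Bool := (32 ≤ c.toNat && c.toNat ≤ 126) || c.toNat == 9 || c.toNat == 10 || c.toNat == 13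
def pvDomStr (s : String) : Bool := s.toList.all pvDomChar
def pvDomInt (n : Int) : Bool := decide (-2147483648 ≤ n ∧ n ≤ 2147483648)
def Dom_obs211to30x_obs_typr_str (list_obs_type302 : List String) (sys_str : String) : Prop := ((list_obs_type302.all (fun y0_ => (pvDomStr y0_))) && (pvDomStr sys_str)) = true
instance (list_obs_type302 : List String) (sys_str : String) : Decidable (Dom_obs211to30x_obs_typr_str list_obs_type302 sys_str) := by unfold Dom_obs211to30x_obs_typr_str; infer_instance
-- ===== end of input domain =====

-- B replaces A's index-arithmetic loop (range over int((len-1)/13), negative-tail slices and a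
-- padded/unpadded final special case) by a recursive split into 13-element chunks and a recursive
-- renderer that pads the last chunk uniformly; objective: simpler.

-- ' ' * k
def pvSpaces (k : Nat) : String := String.ofList (List.replicate k ' ')

-- ===== PORT A =====
def obs211to30x_obs_type_num_str (lentmp : Int) : String :=
  if lentmp < 10 then pvSpaces 2 ++ PySem.Int.toStr lentmp
  else if 10 ≤ lentmp ∧ lentmp < 100 then " " ++ PySem.Int.toStr lentmp
  else PySem.Int.toStr lentmp

def obs211to30x_obs_typr_str (list_obs_type302 : List String) (sys_str : String) : String :=
  let lentmp : Int := PySem.List.len list_obs_type302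
  -- int((lentmp - 1) / 13) : float true division then int() = truncating division (PySem.Int.truncdiv)
  let type_obs_str :=
    (PySem.List.pyRange 0 (PySem.Int.truncdiv (lentmp - 1) 13) 1).foldl
      (fun acc i =>
        acc ++ PySem.Str.join " " (PySem.List.slice list_obs_type302 (some (i * 13)) (some ((i + 1) * 13)))
            ++ "  SYS / # / OBS TYPES \n" ++ pvSpaces 7) ""
  let type_obs_str := sys_str ++ pvSpaces 2 ++ obs211to30x_obs_type_num_str lentmp ++ " " ++ type_obs_str
  if PySem.Int.mod lentmp 13 = 0 ∧ lentmp > 0 then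
    type_obs_str ++ PySem.Str.join " " (PySem.List.slice list_obs_type302 (some (-13)) none)
      ++ "  SYS / # / OBS TYPES \n"
  else
    type_obs_str ++ PySem.Str.join " " (PySem.List.slice list_obs_type302 (some (-(PySem.Int.mod lentmp 13))) none)
      ++ pvSpaces (((13 - PySem.Int.mod lentmp 13) * 4).toNat) ++ "  SYS / # / OBS TYPES \n"

-- ===== PORT B =====
def pvChunks13 (lst : List String) : List (List String) :=
  if _h : lst.length ≤ 13 then [lst]
  else PySem.List.slice lst none (some 13) :: pvChunks13 (PySem.List.slice lst (some 13) none)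
termination_by lst.length
decreasing_by
  have h13 := PySem.List.slice_from lst (a := 13) (by norm_num)
  simp only [h13]
  simp; omega

-- _render: Python indexes chunks[0], raising only on [], which _chunks13 never produces;
-- the [] branch returns "" for totality.
def pvRender (chunks : List (List String)) : String :=
  match chunks with
  | [] => ""
  | [head] =>
      PySem.Str.join " " head ++ pvSpaces ((13 - head.length) * 4) ++ "  SYS / # / OBS TYPES \n"
  | head :: rest =>
      PySem.Str.join " " head ++ "  SYS / # / OBS TYPES \n" ++ pvSpaces 7 ++ pvRender rest

def obs211to30x_obs_typr_str_alt (list_obs_type302 : List String) (sys_str : String) : String :=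
  let n : Int := PySem.List.len list_obs_type302
  let num := if n ≥ 100 then PySem.Int.toStr n
             else if n ≥ 10 then " " ++ PySem.Int.toStr n
             else "  " ++ PySem.Int.toStr n
  sys_str ++ "  " ++ num ++ " " ++ pvRender (pvChunks13 list_obs_type302)

-- ===== PRECONDITION & SPEC =====
def Spec_obs211to30x_obs_typr_str (list_obs_type302 : List String) (sys_str : String) (out : String) : Prop := out = obs211to30x_obs_typr_str_alt list_obs_type302 sys_str
instance (list_obs_type302 : List String) (sys_str : String) (out : String) : Decidable (Spec_obs211to30x_obs_typr_str list_obs_type302 sys_str out) := by unfold Spec_obs211to30x_obs_typr_str; infer_instance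

-- ===== CLAIM (what is proved, stated in full; the proofs are below) =====
def Claim_equal_obs211to30x_obs_typr_str : Prop := ∀ (list_obs_type302 : List String) (sys_str : String), Dom_obs211to30x_obs_typr_str list_obs_type302 sys_str → Spec_obs211to30x_obs_typr_str list_obs_type302 sys_str (obs211to30x_obs_typr_str list_obs_type302 sys_str)

-- ===== LEMMAS AND PROOFS =====

-- A's loop body and final line, as standalone pieces (proof-side only)
def pvBodyA (l : List String) : String :=
  (PySem.List.pyRange 0 (PySem.Int.truncdiv (PySem.List.len l - 1) 13) 1).foldl
    (fun acc i =>
      acc ++ PySem.Str.join " " (PySem.List.slice l (some (i * 13)) (some ((i + 1) * 13)))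
          ++ "  SYS / # / OBS TYPES \n" ++ pvSpaces 7) ""

def pvFinalA (l : List String) : String :=
  if PySem.Int.mod (PySem.List.len l) 13 = 0 ∧ PySem.List.len l > 0 then
    PySem.Str.join " " (PySem.List.slice l (some (-13)) none) ++ "  SYS / # / OBS TYPES \n"
  else
    PySem.Str.join " " (PySem.List.slice l (some (-(PySem.Int.mod (PySem.List.len l) 13))) none)
      ++ pvSpaces (((13 - PySem.Int.mod (PySem.List.len l) 13) * 4).toNat) ++ "  SYS / # / OBS TYPES \n"

lemma pvA_decompose (l : List String) (s : String) :
    obs211to30x_obs_typr_str l s =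
      s ++ pvSpaces 2 ++ obs211to30x_obs_type_num_str (PySem.List.len l) ++ " "
        ++ (pvBodyA l ++ pvFinalA l) := by
  unfold obs211to30x_obs_typr_str pvBodyA pvFinalA
  by_cases h : PySem.Int.mod (PySem.List.len l) 13 = 0 ∧ PySem.List.len l > 0
  · simp only [if_pos h, String.append_assoc]
  · simp only [if_neg h, String.append_assoc]

lemma pvNum_eq (n : Int) :
    obs211to30x_obs_type_num_str n =
      (if n ≥ 100 then PySem.Int.toStr n
       else if n ≥ 10 then " " ++ PySem.Int.toStr n
       else "  " ++ PySem.Int.toStr n) := by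
  have h2 : pvSpaces 2 = "  " := rfl
  unfold obs211to30x_obs_type_num_str
  split_ifs with h1 h2' h3 h4 <;> first | rfl | omega

-- folding string-append distributes over a prefix of the accumulator
lemma pvFoldInit (xs : List Int) (g : Int → String) (s t : String) :
    xs.foldl (fun acc i => acc ++ g i) (s ++ t) = s ++ xs.foldl (fun acc i => acc ++ g i) t := by
  induction xs generalizing t with
  | nil => rfl
  | cons x xs ih => simp only [List.foldl_cons, String.append_assoc, ih]

-- one iteration of A's loop body
def pvGA (l : List String) (i : Int) : String :=
  PySem.Str.join " " (PySem.List.slice l (some (i * 13)) (some ((i + 1) * 13)))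
    ++ "  SYS / # / OBS TYPES \n" ++ pvSpaces 7

lemma pvBodyA_eq (l : List String) :
    pvBodyA l = (PySem.List.pyRange 0 (PySem.Int.truncdiv ((l.length : Int) - 1) 13) 1).foldl
      (fun acc i => acc ++ pvGA l i) "" := by
  unfold pvBodyA pvGA
  simp only [PySem.List.len_eq, String.append_assoc]

lemma pvGA_shift (l : List String) (k : Nat) :
    pvGA l (1 + (k : Int)) = pvGA (l.drop 13) (k : Int) := by
  unfold pvGA
  have e1 : ((1 + (k:Int)) * 13).toNat = 13 + 13 * k := by omega
  have e2 : ((1 + (k:Int) + 1) * 13).toNat = 26 + 13 * k := by omega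
  have e3 : (((k:Int)) * 13).toNat = 13 * k := by omega
  have e4 : (((k:Int) + 1) * 13).toNat = 13 + 13 * k := by omega
  rw [PySem.List.slice_toNat _ (by omega) (by omega), PySem.List.slice_toNat _ (by omega) (by omega),
      e1, e2, e3, e4, List.drop_drop]
  have t1 : 26 + 13 * k - (13 + 13 * k) = 13 := by omega
  have t2 : 13 + 13 * k - 13 * k = 13 := by omega
  have t3 : 13 + 13 * k = 13 * k + 13 := by omega
  rw [t1, t2, t3]

lemma pvShift (l : List String) (T : Int) :
    (PySem.List.pyRange 1 (T + 1) 1).foldl (fun acc i => acc ++ pvGA l i) "" =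
    (PySem.List.pyRange 0 T 1).foldl (fun acc i => acc ++ pvGA (l.drop 13) i) "" := by
  rw [PySem.List.pyRange_one 1 (T + 1), PySem.List.pyRange_one 0 T]
  simp only [add_sub_cancel_right, sub_zero]
  simp only [List.foldl_map]
  have hfun : (fun (acc : String) (k : Nat) => acc ++ pvGA l (1 + (k : Int))) =
      (fun (acc : String) (k : Nat) => acc ++ pvGA (l.drop 13) (0 + (k : Int))) := by
    funext acc k
    rw [pvGA_shift, zero_add]
  rw [hfun]

lemma pvFinalA_drop (l : List String) (h : 13 < l.length) :
    pvFinalA l = pvFinalA (l.drop 13) := by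
  unfold pvFinalA
  simp only [PySem.List.len_eq, List.length_drop]
  have hm1 : PySem.Int.mod ((l.length : Nat) : Int) 13 = ((l.length : Int)) % 13 :=
    PySem.Int.mod_eq_emod_of_pos (by norm_num)
  have hm2 : PySem.Int.mod ((l.length - 13 : Nat) : Int) 13 = ((l.length - 13 : Nat) : Int) % 13 :=
    PySem.Int.mod_eq_emod_of_pos (by norm_num)
  rw [hm1, hm2]
  by_cases h0 : ((l.length : Int)) % 13 = 0
  · have c1 : ((l.length : Int)) % 13 = 0 ∧ ((l.length : Nat) : Int) > 0 := ⟨h0, by omega⟩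
    have c2 : ((l.length - 13 : Nat) : Int) % 13 = 0 ∧ ((l.length - 13 : Nat) : Int) > 0 := by
      rw [Nat.cast_sub (by omega : 13 ≤ l.length)]
      constructor <;> omega
    rw [if_pos c1, if_pos c2,
        PySem.List.slice_from_neg_ofNat l 13 (by norm_num),
        PySem.List.slice_from_neg_ofNat (l.drop 13) 13 (by norm_num),
        List.drop_drop, List.length_drop]
    have : l.length - 13 = 13 + (l.length - 13 - 13) := by omega
    rw [← this]
  · have hr : ((l.length : Int)) % 13 = ((l.length % 13 : Nat) : Int) := by omega
    have hr' : ((l.length - 13 : Nat) : Int) % 13 = ((l.length % 13 : Nat) : Int) := by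
      rw [Nat.cast_sub (by omega : 13 ≤ l.length)]
      omega
    rw [if_neg (by omega), if_neg (by omega), hr, hr',
        PySem.List.slice_from_neg_natCast l (k := l.length % 13) (by omega),
        PySem.List.slice_from_neg_natCast (l.drop 13) (k := l.length % 13) (by omega),
        List.drop_drop, List.length_drop]
    have : l.length - l.length % 13 = 13 + (l.length - 13 - l.length % 13) := by omega
    rw [← this]

lemma pvChunks13_ne_nil (l : List String) : pvChunks13 l ≠ [] := by
  rw [pvChunks13]
  split <;> simp

lemma pvRender_cons (c : List String) (rest : List (List String)) (h : rest ≠ []) :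
    pvRender (c :: rest) =
      PySem.Str.join " " c ++ "  SYS / # / OBS TYPES \n" ++ pvSpaces 7 ++ pvRender rest := by
  cases rest with
  | nil => exact absurd rfl h
  | cons a b => rfl

lemma pvGA_zero (l : List String) :
    pvGA l 0 = PySem.Str.join " " (l.take 13) ++ "  SYS / # / OBS TYPES \n" ++ pvSpaces 7 := by
  unfold pvGA
  norm_num
  rw [PySem.List.slice_to l (b := 13) (by norm_num)]
  rfl

lemma pvKey (l : List String) : pvBodyA l ++ pvFinalA l = pvRender (pvChunks13 l) := by
  by_cases hle : l.length ≤ 13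
  · -- base: no loop iterations, a single chunk
    have hT : PySem.Int.truncdiv ((PySem.List.len l) - 1) 13 = 0 := by
      simp only [PySem.List.len_eq]
      rcases Nat.eq_zero_or_pos l.length with h0 | hpos
      · rw [h0]; decide
      · unfold PySem.Int.truncdiv
        rw [Int.tdiv_eq_ediv_of_nonneg (by omega)]
        omega
    have hbody : pvBodyA l = "" := by
      unfold pvBodyA
      rw [hT, PySem.List.pyRange_one_eq_nil (by norm_num)]
      rfl
    have hch : pvChunks13 l = [l] := by rw [pvChunks13, dif_pos hle]
    rw [hbody, String.empty_append, hch]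
    unfold pvFinalA pvRender
    simp only [PySem.List.len_eq]
    have hm1 : PySem.Int.mod ((l.length : Nat) : Int) 13 = ((l.length : Int)) % 13 :=
      PySem.Int.mod_eq_emod_of_pos (by norm_num)
    rw [hm1]
    by_cases h13 : l.length = 13
    · rw [if_pos (by omega), PySem.List.slice_from_neg_ofNat l 13 (by norm_num), h13]
      norm_num [pvSpaces]
    · rw [if_neg (by omega)]
      by_cases h0 : l.length = 0
      · have : l = [] := List.eq_nil_of_length_eq_zero h0
        subst this
        decide
      · have hr : ((l.length : Int)) % 13 = ((l.length : Nat) : Int) := by omega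
        rw [hr, PySem.List.slice_from_neg_natCast l (k := l.length) (by omega), Nat.sub_self,
            List.drop_zero]
        have hp : (((13 : Int) - (l.length : Nat)) * 4).toNat = (13 - l.length) * 4 := by omega
        rw [hp]
  · -- step: peel the first 13-element chunk off both sides
    rw [Nat.not_le] at hle
    have hdlt : (l.drop 13).length < l.length := by simp; omega
    have ih := pvKey (l.drop 13)
    have hT : PySem.Int.truncdiv ((l.length : Int) - 1) 13 =
        PySem.Int.truncdiv (((l.drop 13).length : Int) - 1) 13 + 1 := by
      unfold PySem.Int.truncdiv
      rw [Int.tdiv_eq_ediv_of_nonneg (by omega), Int.tdiv_eq_ediv_of_nonneg (by simp; omega)]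
      simp only [List.length_drop]
      omega
    have hT0 : 0 ≤ PySem.Int.truncdiv (((l.drop 13).length : Int) - 1) 13 := by
      unfold PySem.Int.truncdiv
      rw [Int.tdiv_eq_ediv_of_nonneg (by simp; omega)]
      simp only [List.length_drop]
      omega
    have hbody : pvBodyA l = pvGA l 0 ++ pvBodyA (l.drop 13) := by
      rw [pvBodyA_eq l, hT, PySem.List.pyRange_one_cons (by omega), List.foldl_cons,
          String.empty_append, zero_add, ← String.append_empty (s := pvGA l 0), pvFoldInit,
          pvShift, ← pvBodyA_eq (l.drop 13), String.append_empty]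
    have hch : pvChunks13 l = l.take 13 :: pvChunks13 (l.drop 13) := by
      rw [pvChunks13, dif_neg (by omega)]
      have hs1 := PySem.List.slice_to l (b := 13) (by norm_num)
      have hs2 := PySem.List.slice_from l (a := 13) (by norm_num)
      rw [hs1, hs2]
      rfl
    rw [hbody, hch, pvRender_cons _ _ (pvChunks13_ne_nil _), pvFinalA_drop l hle,
        String.append_assoc, ih, pvGA_zero]
termination_by l.length
decreasing_by simpa using hdlt

-- ===== VERDICT (by name: the statement is the Claim_ definition above) =====
theorem obs211to30x_obs_typr_str_spec : Claim_equal_obs211to30x_obs_typr_str := by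
  intro l s _
  show _ = _
  rw [pvA_decompose, pvKey, pvNum_eq]
  show _ = obs211to30x_obs_typr_str_alt l s
  unfold obs211to30x_obs_typr_str_alt
  simp only [String.append_assoc]
  rfl
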